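-- pv_equiv track=rewrite | github.com/Alex92rus/ErrorDetectionProject | classifier/multilayer_logistic_regression.py | feed_windows_only_tokens
-- ===== SOURCE A (Python) =====
-- def feed_windows_only_tokens(_data, _window_size):
--     windows = []
--     max_length = 0
--     for sentence, errors in _data:
--         tokens = sentence.split()
--         if len(tokens) > max_length:
--             max_length = len(tokens)
--         word_window_size = min(len(tokens), _window_size)
--         for i in range(0, len(tokens) - word_window_size + 1):
--             window_tuple = (tokens[i:i + word_window_size], )
--             window_range = range(i, i + word_window_size)
--             for error in errors:
--                 if error[0] in window_range or error[1] in window_range: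
--                     if len(window_tuple) < 2:
--                         window_tuple = window_tuple + (has_error, )
--             if len(window_tuple) == 1:
--                 window_tuple = window_tuple + (no_error, )
--             windows.append(window_tuple)
--     return windows
--
-- has_error = 1
--
-- no_error = 0
-- ===== SOURCE B (Python) =====
-- def feed_windows_only_tokens(_data, _window_size):
--     windows = []
--     for sentence, errors in _data:
--         tokens = sentence.split()
--         n = len(tokens)
--         w = min(n, _window_size)
--         endpoints = set()
--         for start, end in errors:
--             endpoints.add(start)
--             endpoints.add(end)
--         for i in range(n - w + 1):
--             label = 1 if any(j in endpoints for j in range(i, i + w)) else 0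
--             windows.append((tokens[i:i + w], label))
--     return windows
-- ===== Notes on version B (the rewrite author's own statement) =====
-- stated objective: alternative
-- what changed: Per sentence B builds the set of error endpoints once and labels each window by scanning the window's positions against that set, instead of A's rescan of the whole error list (and its tuple-growing trick) for every window; the unused max_length bookkeeping is dropped.
import Mathlib
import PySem

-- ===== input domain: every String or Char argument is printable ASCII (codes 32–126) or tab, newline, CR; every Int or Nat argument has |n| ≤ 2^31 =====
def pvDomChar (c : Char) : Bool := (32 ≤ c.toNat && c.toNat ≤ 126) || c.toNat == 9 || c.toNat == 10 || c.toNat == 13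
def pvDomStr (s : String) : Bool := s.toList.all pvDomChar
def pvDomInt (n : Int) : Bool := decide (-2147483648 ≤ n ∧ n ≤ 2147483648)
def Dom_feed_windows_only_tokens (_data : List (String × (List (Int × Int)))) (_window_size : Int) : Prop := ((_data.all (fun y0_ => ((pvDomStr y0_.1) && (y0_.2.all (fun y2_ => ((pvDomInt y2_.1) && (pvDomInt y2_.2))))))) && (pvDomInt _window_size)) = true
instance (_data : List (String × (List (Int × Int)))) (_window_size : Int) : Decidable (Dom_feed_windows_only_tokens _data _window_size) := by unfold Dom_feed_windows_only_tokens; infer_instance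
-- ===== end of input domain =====

-- B replaces A's per-window scan over the error list by an endpoint set built once per
-- sentence plus a scan over the window's positions (objective: alternative algorithm).

-- ===== PORT A =====
-- A's tuple that grows from (tokens,) to (tokens, label) is modelled by an Option Int label:
-- none = length-1 tuple, some l = length-2 tuple; 'len(window_tuple) < 2' is 'lab = none'.
def feed_windows_only_tokens (_data : List (String × (List (Int × Int)))) (_window_size : Int) : List (List String × Int) :=
  (_data.foldl (fun (st : List (List String × Int) × Int) se =>
    let tokens := PySem.Str.split₀ se.1
    let maxLen := if (tokens.length : Int) > st.2 then (tokens.length : Int) else st.2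
    let w := min (tokens.length : Int) _window_size
    let windows := (PySem.List.pyRange 0 ((tokens.length : Int) - w + 1) 1).foldl (fun ws i =>
      let window := PySem.List.slice tokens (some i) (some (i + w))
      let lab : Option Int := se.2.foldl (fun lab e =>
        if (i ≤ e.1 ∧ e.1 < i + w) ∨ (i ≤ e.2 ∧ e.2 < i + w) then
          (if lab = none then some 1 else lab)
        else lab) none
      ws ++ [(window, lab.getD 0)]) st.1
    (windows, maxLen)) ([], 0)).1

-- ===== PORT B =====
def feed_windows_only_tokens_alt (_data : List (String × (List (Int × Int)))) (_window_size : Int) : List (List String × Int) :=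
  _data.foldl (fun windows se =>
    let tokens := PySem.Str.split₀ se.1
    let n : Int := tokens.length
    let w := min n _window_size
    let endpoints : PySem.Set Int := se.2.foldl (fun s e => PySem.Set.add (PySem.Set.add s e.1) e.2) PySem.Set.empty
    (PySem.List.pyRange 0 (n - w + 1) 1).foldl (fun ws i =>
      let lab : Int := if (PySem.List.pyRange i (i + w) 1).any (fun j => PySem.Set.contains endpoints j) then 1 else 0
      ws ++ [(PySem.List.slice tokens (some i) (some (i + w)), lab)]) windows) []

-- ===== PRECONDITION & SPEC =====
def Spec_feed_windows_only_tokens (_data : List (String × (List (Int × Int)))) (_window_size : Int) (out : List (List String × Int)) : Prop := out = feed_windows_only_tokens_alt _data _window_size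
instance (_data : List (String × (List (Int × Int)))) (_window_size : Int) (out : List (List String × Int)) : Decidable (Spec_feed_windows_only_tokens _data _window_size out) := by unfold Spec_feed_windows_only_tokens; infer_instance

-- ===== CLAIM (what is proved, stated in full; the proofs are below) =====
def Claim_equal_feed_windows_only_tokens : Prop := ∀ (_data : List (String × (List (Int × Int)))) (_window_size : Int), Dom_feed_windows_only_tokens _data _window_size → Spec_feed_windows_only_tokens _data _window_size (feed_windows_only_tokens _data _window_size)

-- ===== LEMMAS AND PROOFS =====

-- A's label fold is an existence test over the error list
theorem labFold_some_one (errors : List (Int × Int)) (c : Int × Int → Prop) [DecidablePred c] :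
    errors.foldl (fun lab e => if c e then (if lab = none then some (1:Int) else lab) else lab) (some 1) = some 1 := by
  induction errors with
  | nil => rfl
  | cons e t ih => simp only [List.foldl_cons]; split_ifs <;> simpa using ih

theorem labFold_none (errors : List (Int × Int)) (c : Int × Int → Prop) [DecidablePred c] :
    errors.foldl (fun lab e => if c e then (if lab = none then some (1:Int) else lab) else lab) none
      = if ∃ e ∈ errors, c e then some 1 else none := by
  induction errors with
  | nil => simp
  | cons e t ih =>
    simp only [List.foldl_cons]
    by_cases hc : c e
    · simp [hc, labFold_some_one]
    · by_cases ht : ∃ e ∈ t, c e <;> simp [hc, ht, ih]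

-- membership in B's endpoint set
theorem mem_endpointFold (errors : List (Int × Int)) (s : PySem.Set Int) (j : Int) :
    (j ∈ errors.foldl (fun s e => PySem.Set.add (PySem.Set.add s e.1) e.2) s)
      ↔ (j ∈ s ∨ ∃ e ∈ errors, j = e.1 ∨ j = e.2) := by
  induction errors generalizing s with
  | nil => simp
  | cons e t ih =>
    simp only [List.foldl_cons, ih, PySem.Set.mem_add]
    constructor
    · rintro (((h | h) | h) | h)
      · exact Or.inl h
      · exact Or.inr ⟨e, by simp, Or.inl h⟩
      · exact Or.inr ⟨e, by simp, Or.inr h⟩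
      · obtain ⟨e', he', h⟩ := h; exact Or.inr ⟨e', by simp [he'], h⟩
    · rintro (h | ⟨e', he', h⟩)
      · exact Or.inl (Or.inl (Or.inl h))
      · rcases List.mem_cons.mp he' with rfl | he'
        · rcases h with h | h
          · exact Or.inl (Or.inl (Or.inr h))
          · exact Or.inl (Or.inr h)
        · exact Or.inr ⟨e', he', h⟩

-- the two labels agree for a fixed window
theorem label_eq (errors : List (Int × Int)) (i w : Int) :
    (errors.foldl (fun lab e =>
        if (i ≤ e.1 ∧ e.1 < i + w) ∨ (i ≤ e.2 ∧ e.2 < i + w) then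
          (if lab = none then some (1:Int) else lab)
        else lab) none).getD 0
      = if (PySem.List.pyRange i (i + w) 1).any
            (fun j => PySem.Set.contains (errors.foldl (fun s e => PySem.Set.add (PySem.Set.add s e.1) e.2) PySem.Set.empty) j)
          then 1 else 0 := by
  rw [labFold_none errors (fun e => (i ≤ e.1 ∧ e.1 < i + w) ∨ (i ≤ e.2 ∧ e.2 < i + w))]
  have hmem : ∀ j : Int,
      PySem.Set.contains (errors.foldl (fun s e => PySem.Set.add (PySem.Set.add s e.1) e.2) PySem.Set.empty) j
        = true ↔ (∃ e ∈ errors, j = e.1 ∨ j = e.2) := by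
    intro j
    rw [show (PySem.Set.contains (errors.foldl (fun s e => PySem.Set.add (PySem.Set.add s e.1) e.2) PySem.Set.empty) j = true)
        ↔ j ∈ errors.foldl (fun s e => PySem.Set.add (PySem.Set.add s e.1) e.2) PySem.Set.empty from by
      simp [PySem.Set.contains]]
    rw [mem_endpointFold]
    simp [PySem.Set.empty]
  have hiff : (∃ e ∈ errors, (i ≤ e.1 ∧ e.1 < i + w) ∨ (i ≤ e.2 ∧ e.2 < i + w))
      ↔ ((PySem.List.pyRange i (i + w) 1).any
          (fun j => PySem.Set.contains (errors.foldl (fun s e => PySem.Set.add (PySem.Set.add s e.1) e.2) PySem.Set.empty) j) = true) := by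
    rw [List.any_eq_true]
    constructor
    · rintro ⟨e, he, (⟨h1, h2⟩ | ⟨h1, h2⟩)⟩
      · exact ⟨e.1, PySem.List.mem_pyRange_one.mpr ⟨h1, h2⟩, (hmem e.1).mpr ⟨e, he, Or.inl rfl⟩⟩
      · exact ⟨e.2, PySem.List.mem_pyRange_one.mpr ⟨h1, h2⟩, (hmem e.2).mpr ⟨e, he, Or.inr rfl⟩⟩
    · rintro ⟨j, hj, hc⟩
      obtain ⟨e, he, hje⟩ := (hmem j).mp hc
      obtain ⟨h1, h2⟩ := PySem.List.mem_pyRange_one.mp hj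
      rcases hje with rfl | rfl
      · exact ⟨e, he, Or.inl ⟨h1, h2⟩⟩
      · exact ⟨e, he, Or.inr ⟨h1, h2⟩⟩
  by_cases h : ∃ e ∈ errors, (i ≤ e.1 ∧ e.1 < i + w) ∨ (i ≤ e.2 ∧ e.2 < i + w)
  · rw [if_pos h, if_pos (hiff.mp h)]; rfl
  · rw [if_neg h, if_neg (fun hc => h (hiff.mpr hc))]; rfl

-- per-sentence window folds agree, for any shared accumulator
theorem sentence_eq (se : String × List (Int × Int)) (ws : Int) (acc : List (List String × Int)) :
    (PySem.List.pyRange 0 (((PySem.Str.split₀ se.1).length : Int) - min ((PySem.Str.split₀ se.1).length : Int) ws + 1) 1).foldl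
      (fun a i =>
        a ++ [(PySem.List.slice (PySem.Str.split₀ se.1) (some i) (some (i + min ((PySem.Str.split₀ se.1).length : Int) ws)),
          (se.2.foldl (fun lab e =>
            if (i ≤ e.1 ∧ e.1 < i + min ((PySem.Str.split₀ se.1).length : Int) ws) ∨
               (i ≤ e.2 ∧ e.2 < i + min ((PySem.Str.split₀ se.1).length : Int) ws) then
              (if lab = none then some (1:Int) else lab)
            else lab) none).getD 0)]) acc
    = (PySem.List.pyRange 0 (((PySem.Str.split₀ se.1).length : Int) - min ((PySem.Str.split₀ se.1).length : Int) ws + 1) 1).foldl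
      (fun a i =>
        a ++ [(PySem.List.slice (PySem.Str.split₀ se.1) (some i) (some (i + min ((PySem.Str.split₀ se.1).length : Int) ws)),
          if (PySem.List.pyRange i (i + min ((PySem.Str.split₀ se.1).length : Int) ws) 1).any
              (fun j => PySem.Set.contains (se.2.foldl (fun s e => PySem.Set.add (PySem.Set.add s e.1) e.2) PySem.Set.empty) j)
            then 1 else 0)]) acc := by
  apply List.foldl_ext
  intro a i _
  rw [label_eq]

-- main fold: A's pair state projects to B's fold for every start state
theorem fold_eq (data : List (String × List (Int × Int))) (ws : Int)
    (acc : List (List String × Int)) (m : Int) :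
    (data.foldl (fun (st : List (List String × Int) × Int) se =>
      let tokens := PySem.Str.split₀ se.1
      let maxLen := if (tokens.length : Int) > st.2 then (tokens.length : Int) else st.2
      let w := min (tokens.length : Int) ws
      let windows := (PySem.List.pyRange 0 ((tokens.length : Int) - w + 1) 1).foldl (fun a i =>
        let window := PySem.List.slice tokens (some i) (some (i + w))
        let lab : Option Int := se.2.foldl (fun lab e =>
          if (i ≤ e.1 ∧ e.1 < i + w) ∨ (i ≤ e.2 ∧ e.2 < i + w) then
            (if lab = none then some 1 else lab)
          else lab) none
        a ++ [(window, lab.getD 0)]) st.1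
      (windows, maxLen)) (acc, m)).1
    = data.foldl (fun windows se =>
      let tokens := PySem.Str.split₀ se.1
      let n : Int := tokens.length
      let w := min n ws
      let endpoints : PySem.Set Int := se.2.foldl (fun s e => PySem.Set.add (PySem.Set.add s e.1) e.2) PySem.Set.empty
      (PySem.List.pyRange 0 (n - w + 1) 1).foldl (fun a i =>
        let lab : Int := if (PySem.List.pyRange i (i + w) 1).any (fun j => PySem.Set.contains endpoints j) then 1 else 0
        a ++ [(PySem.List.slice tokens (some i) (some (i + w)), lab)]) windows) acc := by
  induction data generalizing acc m with
  | nil => rfl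
  | cons se t ih =>
    simp only [List.foldl_cons]
    rw [ih]
    rw [sentence_eq se ws acc]

-- ===== VERDICT (by name: the statement is the Claim_ definition above) =====
theorem feed_windows_only_tokens_spec : Claim_equal_feed_windows_only_tokens := by
  intro data ws _
  unfold Spec_feed_windows_only_tokens feed_windows_only_tokens feed_windows_only_tokens_alt
  exact fold_eq data ws [] 0
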